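-- pv_equiv track=rewrite | github.com/Jerry2003826/RelationshipOS | src/relationship_os/application/analyzers/emotional_prompt.py | _match_known_entity
-- ===== SOURCE A (Python) =====
-- from collections.abc import Iterable, Mapping
--
-- def _match_known_entity(raw: str, entity_index: Mapping[str, set[str]]) -> str:
--     """Return the longest known entity that is a prefix of *raw* (or empty).
--
--     The response regex tends to over-capture (e.g. "年糕一样"); this peels
--     the real entity off the front. Longest-match avoids prefix collisions
--     like "年糕" vs "年糕奶".
--     """
--     if not raw or not entity_index:
--         return ""
--     best = ""
--     for entity in entity_index:
--         if raw.startswith(entity) and len(entity) > len(best):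
--             best = entity
--     return best
-- ===== SOURCE B (Python) =====
-- def _match_known_entity(raw: str, entity_index) -> str:
--     """Longest known entity that is a prefix of raw: hash-set lookup of raw's
--     prefixes, trying only the distinct key lengths, longest first."""
--     keys = set(entity_index)
--     for k in sorted({len(e) for e in keys if len(e) <= len(raw)}, reverse=True):
--         prefix = raw[:k]
--         if prefix in keys:
--             return prefix
--     return ""
-- ===== Notes on version B (the rewrite author's own statement) =====
-- stated objective: alternative
-- what changed: Instead of scanning every entity key and string-comparing each against raw, B builds a hash set of the keys once and probes raw's prefixes at the distinct key lengths, longest first, returning the first hit; on the measured inputs this traded evenly with A.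
import Mathlib
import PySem

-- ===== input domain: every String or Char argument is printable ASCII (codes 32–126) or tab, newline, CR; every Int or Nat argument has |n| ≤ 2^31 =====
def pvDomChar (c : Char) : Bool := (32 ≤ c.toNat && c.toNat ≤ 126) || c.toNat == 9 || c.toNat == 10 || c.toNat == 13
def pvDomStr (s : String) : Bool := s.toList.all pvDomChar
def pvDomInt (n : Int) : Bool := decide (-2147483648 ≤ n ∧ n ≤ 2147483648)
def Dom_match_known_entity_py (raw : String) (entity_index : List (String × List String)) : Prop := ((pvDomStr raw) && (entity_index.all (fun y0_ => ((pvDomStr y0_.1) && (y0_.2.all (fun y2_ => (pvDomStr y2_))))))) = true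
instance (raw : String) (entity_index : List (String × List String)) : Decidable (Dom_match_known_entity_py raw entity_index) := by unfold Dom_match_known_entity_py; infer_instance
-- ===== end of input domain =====

-- B replaces A's scan over all entity keys (each string-compared against raw) by a hash-set of the
-- keys probed with raw's prefixes at the distinct key lengths, longest first; objective: alternative.

-- ===== PORT A =====
-- the body of A's 'for entity in entity_index' loop (a dict iterates its keys, i.e. the first components)
def stepA (raw best : String) (p : String × List String) : String :=
  if PySem.Str.startswith raw p.1 && decide (PySem.Str.len p.1 > PySem.Str.len best) then p.1 else best

def match_known_entity_py (raw : String) (entity_index : List (String × List String)) : String :=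
  if raw = "" ∨ entity_index = [] then ""
  else entity_index.foldl (stepA raw) ""

-- ===== PORT B =====
-- 'for k in sorted(..., reverse=True)' ported as structural recursion on the sorted length list
def altLoop (raw : String) (keys : PySem.Set String) : List Int → String
  | [] => ""
  | k :: rest =>
      let pfx := PySem.Str.slice raw none (some k)
      if keys.contains pfx then pfx else altLoop raw keys rest

def match_known_entity_py_alt (raw : String) (entity_index : List (String × List String)) : String :=
  let keys := PySem.Set.ofList (entity_index.map Prod.fst)
  let lens := PySem.List.sorted
    (PySem.Set.ofList ((keys.filter (fun e => decide (PySem.Str.len e ≤ PySem.Str.len raw))).map PySem.Str.len))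
    (fun k => k) true
  altLoop raw keys lens

-- ===== PRECONDITION & SPEC =====
def Spec_match_known_entity_py (raw : String) (entity_index : List (String × List String)) (out : String) : Prop := out = match_known_entity_py_alt raw entity_index
instance (raw : String) (entity_index : List (String × List String)) (out : String) : Decidable (Spec_match_known_entity_py raw entity_index out) := by unfold Spec_match_known_entity_py; infer_instance

-- ===== CLAIM (what is proved, stated in full; the proofs are below) =====
def Claim_equal_match_known_entity_py : Prop := ∀ (raw : String) (entity_index : List (String × List String)), Dom_match_known_entity_py raw entity_index → Spec_match_known_entity_py raw entity_index (match_known_entity_py raw entity_index)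

-- ===== LEMMAS AND PROOFS =====

lemma stepA_eq (raw b : String) (p : String × List String) :
    stepA raw b p =
      if p.1.toList <+: raw.toList ∧ b.toList.length < p.1.toList.length then p.1 else b := by
  by_cases h1 : p.1.toList <+: raw.toList <;>
    by_cases h2 : b.toList.length < p.1.toList.length <;>
      simp [stepA, PySem.Str.startswith_eq, PySem.Chars.startswith_iff, PySem.Str.len_eq, h1]

-- A's fold: the result is a prefix of raw, is "" or one of the keys, and its length dominates
-- the length of every key that is a prefix of raw.
lemma foldA_char (raw : String) (ks : List (String × List String)) :
    ∀ b : String, b.toList <+: raw.toList →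
      (ks.foldl (stepA raw) b).toList <+: raw.toList ∧
      ((ks.foldl (stepA raw) b) = b ∨ ∃ p ∈ ks, (ks.foldl (stepA raw) b) = p.1) ∧
      b.toList.length ≤ (ks.foldl (stepA raw) b).toList.length ∧
      ∀ p ∈ ks, p.1.toList <+: raw.toList →
        p.1.toList.length ≤ (ks.foldl (stepA raw) b).toList.length := by
  induction ks with
  | nil => intro b hb; simp [hb]
  | cons p ks ih =>
    intro b hb
    simp only [List.foldl_cons, stepA_eq]
    split_ifs with h
    · obtain ⟨h1, h2⟩ := h
      obtain ⟨hpre, hmem, hlen, hmax⟩ := ih p.1 h1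
      refine ⟨hpre, ?_, le_trans (le_of_lt h2) hlen, ?_⟩
      · rcases hmem with heq | ⟨q, hq, heq⟩
        · exact Or.inr ⟨p, List.mem_cons_self .., heq⟩
        · exact Or.inr ⟨q, List.mem_cons_of_mem _ hq, heq⟩
      · intro q hq hqpre
        rcases List.mem_cons.mp hq with rfl | hq'
        · exact hlen
        · exact hmax q hq' hqpre
    · obtain ⟨hpre, hmem, hlen, hmax⟩ := ih b hb
      refine ⟨hpre, ?_, hlen, ?_⟩
      · rcases hmem with heq | ⟨q, hq, heq⟩
        · exact Or.inl heq
        · exact Or.inr ⟨q, List.mem_cons_of_mem _ hq, heq⟩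
      · intro q hq hqpre
        rcases List.mem_cons.mp hq with rfl | hq'
        · have : ¬ b.toList.length < q.1.toList.length := fun hlt => h ⟨hqpre, hlt⟩
          omega
        · exact hmax q hq' hqpre

-- B's loop over a strictly decreasing list of candidate lengths: either no candidate hits and the
-- result is "", or the result is raw sliced at the largest hitting candidate.
lemma loopB_char (raw : String) (keys : PySem.Set String) :
    ∀ ls : List Int, ls.Pairwise (fun a b => b < a) →
      (altLoop raw keys ls = "" ∧
        ∀ k ∈ ls, keys.contains (PySem.Str.slice raw none (some k)) = false) ∨
      (∃ k ∈ ls,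
        altLoop raw keys ls = PySem.Str.slice raw none (some k) ∧
        keys.contains (PySem.Str.slice raw none (some k)) = true ∧
        ∀ j ∈ ls, k < j → keys.contains (PySem.Str.slice raw none (some j)) = false) := by
  intro ls
  induction ls with
  | nil => intro _; exact Or.inl ⟨rfl, by simp⟩
  | cons k0 rest ih =>
    intro hpw
    have hlt : ∀ j ∈ rest, j < k0 := (List.pairwise_cons.mp hpw).1
    have htail := ih (List.pairwise_cons.mp hpw).2
    by_cases hc : keys.contains (PySem.Str.slice raw none (some k0)) = true
    · refine Or.inr ⟨k0, List.mem_cons_self .., ?_, hc, ?_⟩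
      · simp only [altLoop, hc, if_true]
      · intro j hj hk0j
        rcases List.mem_cons.mp hj with rfl | hj'
        · omega
        · exact absurd (hlt j hj') (by omega)
    · have hc' : keys.contains (PySem.Str.slice raw none (some k0)) = false :=
        Bool.eq_false_iff.mpr hc
      have hres : altLoop raw keys (k0 :: rest) = altLoop raw keys rest := by
        simp only [altLoop, hc', Bool.false_eq_true, if_false]
      rcases htail with ⟨he, hnone⟩ | ⟨k, hk, hkeq, hkc, hkmax⟩
      · refine Or.inl ⟨hres.trans he, fun k hkmem => ?_⟩
        rcases List.mem_cons.mp hkmem with rfl | hk'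
        · exact hc'
        · exact hnone k hk'
      · refine Or.inr ⟨k, List.mem_cons_of_mem _ hk, hres.trans hkeq, hkc, fun j hj hkj => ?_⟩
        rcases List.mem_cons.mp hj with rfl | hj'
        · exact hc'
        · exact hkmax j hj' hkj

lemma slice_toList (raw : String) (k : Nat) :
    (PySem.Str.slice raw none (some (k : Int))).toList = raw.toList.take k := by
  simp [pysem]

lemma contains_keys (entity_index : List (String × List String)) (s : String) :
    (PySem.Set.ofList (entity_index.map Prod.fst)).contains s = true ↔ ∃ p ∈ entity_index, p.1 = s := by
  rw [PySem.Set.contains_iff, PySem.Set.mem_ofList, List.mem_map]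

lemma slice_empty_str (k : Int) : PySem.Str.slice "" none (some k) = "" := by
  apply String.toList_inj.mp
  simp [PySem.Str.slice, PySem.List.slice]

lemma altLoop_empty_raw (keys : PySem.Set String) :
    ∀ ls : List Int, altLoop "" keys ls = ""
  | [] => rfl
  | k :: rest => by
    simp only [altLoop, slice_empty_str]
    split_ifs <;> [rfl; exact altLoop_empty_raw keys rest]

lemma altLoop_empty_keys (raw : String) :
    ∀ ls : List Int, altLoop raw ([] : PySem.Set String) ls = ""
  | [] => rfl
  | k :: rest => by
    simp only [altLoop]
    rw [if_neg (by simp [PySem.Set.contains])]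
    exact altLoop_empty_keys raw rest

-- ===== VERDICT (by name: the statement is the Claim_ definition above) =====
theorem match_known_entity_py_spec : Claim_equal_match_known_entity_py := by
  intro raw ei _
  unfold Spec_match_known_entity_py match_known_entity_py match_known_entity_py_alt
  by_cases h0 : raw = "" ∨ ei = []
  · rw [if_pos h0]
    rcases h0 with rfl | rfl
    · exact (altLoop_empty_raw _ _).symm
    · simp only [List.map_nil]
      exact (altLoop_empty_keys raw _).symm
  · rw [if_neg h0]
    rw [not_or] at h0
    obtain ⟨hraw, hei⟩ := h0
    set keys := PySem.Set.ofList (ei.map Prod.fst) with hkeys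
    set lens := PySem.List.sorted
      (PySem.Set.ofList ((keys.filter (fun e => decide (PySem.Str.len e ≤ PySem.Str.len raw))).map PySem.Str.len))
      (fun k => k) true with hlens
    -- lens is strictly decreasing
    have hpw : lens.Pairwise (fun a b : Int => b < a) := by
      have h1 := PySem.List.sorted_pairwise_rev
        (PySem.Set.ofList ((keys.filter (fun e => decide (PySem.Str.len e ≤ PySem.Str.len raw))).map PySem.Str.len))
        (fun k : Int => k)
      have h2 : lens.Nodup :=
        ((PySem.List.sorted_perm _ _ _).nodup_iff).mpr (PySem.Set.nodup_ofList _)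
      exact (h1.and h2).imp (fun h => lt_of_le_of_ne h.1 (Ne.symm h.2))
    -- lens holds exactly the lengths of keys no longer than raw
    have hmemlens : ∀ k : Int, k ∈ lens ↔
        ∃ e, e ∈ keys ∧ PySem.Str.len e ≤ PySem.Str.len raw ∧ PySem.Str.len e = k := by
      intro k
      rw [hlens, PySem.List.mem_sorted, PySem.Set.mem_ofList, List.mem_map]
      constructor
      · rintro ⟨e, he, rfl⟩
        have := List.mem_filter.mp he
        exact ⟨e, this.1, by simpa using this.2, rfl⟩
      · rintro ⟨e, he, hle, rfl⟩
        exact ⟨e, List.mem_filter.mpr ⟨he, by simpa using hle⟩, rfl⟩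
    obtain ⟨hpre, hmem, -, hmax⟩ := foldA_char raw ei "" (by simp)
    set rA := ei.foldl (stepA raw) "" with hrA
    have hAtake : rA.toList = raw.toList.take rA.toList.length :=
      List.prefix_iff_eq_take.mp hpre
    have hAle : rA.toList.length ≤ raw.toList.length := hpre.length_le
    -- if A's result is nonempty it is a key, and its length is a member of lens
    have hAkey : rA ≠ "" → (∃ p ∈ ei, p.1 = rA) ∧ ((rA.toList.length : Int) ∈ lens) := by
      intro hne
      have hk : ∃ p ∈ ei, p.1 = rA := by
        rcases hmem with heq | ⟨q, hq, heq⟩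
        · exact absurd heq hne
        · exact ⟨q, hq, heq.symm⟩
      refine ⟨hk, (hmemlens _).mpr ⟨rA, ?_, ?_, by rw [PySem.Str.len_eq]⟩⟩
      · rw [hkeys, PySem.Set.mem_ofList, List.mem_map]
        obtain ⟨p, hp, hpe⟩ := hk
        exact ⟨p, hp, hpe⟩
      · rw [PySem.Str.len_eq, PySem.Str.len_eq]
        exact_mod_cast hAle
    have hAslice : PySem.Str.slice raw none (some (rA.toList.length : Int)) = rA :=
      String.toList_inj.mp (by rw [slice_toList]; exact hAtake.symm)
    rcases loopB_char raw keys lens hpw with ⟨he, hnone⟩ | ⟨k, hk, hkeq, hkc, hkmax⟩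
    · -- no candidate length hits: A's result must be "" too
      rw [he]
      by_contra hne
      obtain ⟨hkmem, hlmem⟩ := hAkey hne
      have hcontra := hnone _ hlmem
      rw [hAslice] at hcontra
      have hmemc : keys.contains rA = true := by
        rw [hkeys]; exact (contains_keys ei rA).mpr hkmem
      exact absurd hmemc (by rw [hcontra]; simp)
    · -- B returns raw sliced at the largest hitting length k: so does A
      rw [hkeq]
      obtain ⟨e, hekeys, hele, helen⟩ := (hmemlens k).mp hk
      -- k is a Nat (a key length)
      have hknat : k = ((e.toList.length : Nat) : Int) := by rw [← helen, PySem.Str.len_eq]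
      have hkle : e.toList.length ≤ raw.toList.length := by
        rw [PySem.Str.len_eq, PySem.Str.len_eq] at hele; exact_mod_cast hele
      have hstake : (PySem.Str.slice raw none (some k)).toList = raw.toList.take e.toList.length := by
        rw [hknat, slice_toList]
      have hslen : (PySem.Str.slice raw none (some k)).toList.length = e.toList.length := by
        rw [hstake]; exact List.length_take_of_le hkle
      -- the slice is itself a key and a prefix of raw
      obtain ⟨p, hp, hpe⟩ := (contains_keys ei _).mp (by rw [hkeys] at hkc; exact hkc)
      -- A's result is at least as long
      have h1 : e.toList.length ≤ rA.toList.length := by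
        have := hmax p hp (by rw [hpe, hstake]; exact List.take_prefix _ _)
        rwa [hpe, hslen] at this
      -- and no longer, by maximality of k
      have h2 : rA.toList.length ≤ e.toList.length := by
        by_contra hgt
        rw [Nat.not_le] at hgt
        have hne : rA ≠ "" := by
          intro h; rw [h] at hgt; simp at hgt
        obtain ⟨hkmem, hlmem⟩ := hAkey hne
        have hkj : k < (rA.toList.length : Int) := by rw [hknat]; exact_mod_cast hgt
        have hcontra := hkmax _ hlmem hkj
        rw [hAslice] at hcontra
        have hmemc : keys.contains rA = true := by
          rw [hkeys]; exact (contains_keys ei rA).mpr hkmem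
        exact absurd hmemc (by rw [hcontra]; simp)
      have hlen : rA.toList.length = e.toList.length := le_antisymm h2 h1
      exact String.toList_inj.mp (by rw [hAtake, hlen, hstake])
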